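-- pv_equiv track=rewrite | github.com/MartinOpat/Algorithms-Implementation-In-cpp-python | Other problems/arrayOfDiscord.py | make_unsorted
-- ===== SOURCE A (Python) =====
-- def is_sorted(seq):
--         return all(seq[i] <= seq[i+1] for i in range(len(seq)-1))
--
-- def make_unsorted(sequence):
--     for i, num in enumerate(sequence):
--         num_str = str(num)
--         for j, digit in enumerate(num_str):
--             for k in range(len(num_str) != 1, 10):  # j == 0 \equiv 1, cannot replace first digit with a zero if len > 1
--                 new_num = int(num_str[:j] + str(k) + num_str[j+1:])
--                 new_sequence = sequence[:i] + [new_num] + sequence[i+1:]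
--                 if not is_sorted(new_sequence):
--                     return new_sequence
--
--     return []
-- ===== SOURCE B (Python) =====
-- def make_unsorted(sequence):
--     n = len(sequence)
--     # suf[t] is True iff sequence[t:] is unsorted; filled right-to-left.
--     suf = [False] * n
--     for t in range(n - 2, -1, -1):
--         suf[t] = suf[t + 1] or sequence[t] > sequence[t + 1]
--     pref_unsorted = False  # invariant: sequence[:i] is unsorted
--     for i, num in enumerate(sequence):
--         s = str(num)
--         for j in range(len(s)):
--             for k in range(len(s) != 1, 10):
--                 new_num = int(s[:j] + str(k) + s[j + 1:])
--                 if (pref_unsorted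
--                         or (i + 1 < n and suf[i + 1])
--                         or (i > 0 and sequence[i - 1] > new_num)
--                         or (i + 1 < n and new_num > sequence[i + 1])):
--                     return sequence[:i] + [new_num] + sequence[i + 1:]
--         if i > 0 and sequence[i - 1] > sequence[i]:
--             pref_unsorted = True
--     return []
-- ===== Notes on version B (the rewrite author's own statement) =====
-- stated objective: alternative
-- what changed: B precomputes suffix-sortedness flags once and carries a running prefix-sortedness flag, so each candidate single-digit replacement is judged by neighbour comparisons instead of A's is_sorted re-scan of the whole modified list.
import Mathlib
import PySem

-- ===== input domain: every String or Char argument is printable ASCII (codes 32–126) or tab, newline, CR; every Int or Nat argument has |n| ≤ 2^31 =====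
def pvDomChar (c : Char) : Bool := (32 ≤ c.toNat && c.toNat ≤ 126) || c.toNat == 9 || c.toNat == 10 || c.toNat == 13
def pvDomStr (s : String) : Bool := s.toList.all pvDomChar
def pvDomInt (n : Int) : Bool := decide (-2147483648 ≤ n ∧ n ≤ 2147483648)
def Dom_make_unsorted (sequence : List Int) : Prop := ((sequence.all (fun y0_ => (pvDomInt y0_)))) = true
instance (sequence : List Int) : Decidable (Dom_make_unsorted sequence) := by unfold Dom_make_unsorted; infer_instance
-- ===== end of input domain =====

-- B judges each candidate single-digit replacement by neighbour comparisons against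
-- precomputed suffix-sortedness flags and a running prefix flag, instead of A's is_sorted
-- re-scan of the whole modified list (alternative algorithm).

-- ===== PORT A =====

-- is_sorted(seq): all(seq[i] <= seq[i+1] for i in range(len(seq)-1)); indices are in range,
-- so pyGetD is exact here.
def aIsSorted (seq : List Int) : Bool :=
  (PySem.List.pyRange 0 ((seq.length : Int) - 1) 1).all
    (fun t => decide (PySem.List.pyGetD seq t 0 ≤ PySem.List.pyGetD seq (t + 1) 0))

-- int(num_str[:j] + str(k) + num_str[j+1:]); j is a nonnegative enumerate index, so the
-- slices are exactly take/drop; the argument is always an optional sign followed by digits,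
-- which int() accepts, so Python never raises here and .getD 0 is never taken.
def aNewNum (numStr : List Char) (j : Nat) (k : Int) : Int :=
  (PySem.Int.ofChars? (numStr.take j ++ PySem.Int.toChars k ++ numStr.drop (j + 1))).getD 0

-- inner 'for k in range(len(num_str) != 1, 10)' loop (ks = the remaining k values)
def aTryK (sequence : List Int) (i : Nat) (numStr : List Char) (j : Nat) :
    List Int → Option (List Int)
  | [] => none
  | k :: ks =>
    let newNum := aNewNum numStr j k
    -- sequence[:i] + [new_num] + sequence[i+1:]; i is a nonnegative enumerate index
    let newSeq := sequence.take i ++ [newNum] ++ sequence.drop (i + 1)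
    if aIsSorted newSeq then aTryK sequence i numStr j ks else some newSeq

-- middle 'for j, digit in enumerate(num_str)' loop (js = the remaining digit positions)
def aTryJ (sequence : List Int) (i : Nat) (numStr : List Char) :
    List Nat → Option (List Int)
  | [] => none
  | j :: js =>
    match aTryK sequence i numStr j
        (PySem.List.pyRange (if numStr.length ≠ 1 then 1 else 0) 10 1) with
    | some r => some r
    | none => aTryJ sequence i numStr js

-- outer 'for i, num in enumerate(sequence)' loop
def aLoop (sequence : List Int) : Nat → List Int → List Int
  | _, [] => []
  | i, num :: rest =>
    let numStr := PySem.Int.toChars num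
    match aTryJ sequence i numStr (List.range numStr.length) with
    | some r => r
    | none => aLoop sequence (i + 1) rest

def make_unsorted (sequence : List Int) : List Int := aLoop sequence 0 sequence

-- ===== PORT B =====

-- right-to-left fill of suf (suf[t] = suf[t+1] or sequence[t] > sequence[t+1]) as the
-- obvious structural recursion building the list from its tail
def bSufFlags : List Int → List Bool
  | [] => []
  | [_] => [false]
  | a :: b :: rest =>
    let fs := bSufFlags (b :: rest)
    (fs.headD false || decide (a > b)) :: fs

-- int(s[:j] + str(k) + s[j+1:]) exactly as in A's aNewNum (same Python expression in Source B)
def bNewNum (numStr : List Char) (j : Nat) (k : Int) : Int :=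
  (PySem.Int.ofChars? (numStr.take j ++ PySem.Int.toChars k ++ numStr.drop (j + 1))).getD 0

-- inner k loop of Source B with the neighbour test; the list indexings are guarded in range
def bTryK (sequence : List Int) (n : Nat) (suf : List Bool) (prefU : Bool) (i : Nat)
    (numStr : List Char) (j : Nat) : List Int → Option (List Int)
  | [] => none
  | k :: ks =>
    let newNum := bNewNum numStr j k
    if prefU
        || (decide (i + 1 < n) && suf.getD (i + 1) false)
        || (decide (0 < i) && decide (sequence.getD (i - 1) 0 > newNum))
        || (decide (i + 1 < n) && decide (newNum > sequence.getD (i + 1) 0)) then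
      some (sequence.take i ++ [newNum] ++ sequence.drop (i + 1))
    else bTryK sequence n suf prefU i numStr j ks

-- middle j loop of Source B
def bTryJ (sequence : List Int) (n : Nat) (suf : List Bool) (prefU : Bool) (i : Nat)
    (numStr : List Char) : List Nat → Option (List Int)
  | [] => none
  | j :: js =>
    match bTryK sequence n suf prefU i numStr j
        (PySem.List.pyRange (if numStr.length ≠ 1 then 1 else 0) 10 1) with
    | some r => some r
    | none => bTryJ sequence n suf prefU i numStr js

-- outer enumerate loop of Source B, carrying the running pref_unsorted flag
def bLoop (sequence : List Int) (n : Nat) (suf : List Bool) : Bool → Nat → List Int → List Int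
  | _, _, [] => []
  | prefU, i, num :: rest =>
    let numStr := PySem.Int.toChars num
    match bTryJ sequence n suf prefU i numStr (List.range numStr.length) with
    | some r => r
    | none =>
      bLoop sequence n suf
        (if 0 < i ∧ sequence.getD (i - 1) 0 > sequence.getD i 0 then true else prefU)
        (i + 1) rest

def make_unsorted_alt (sequence : List Int) : List Int :=
  bLoop sequence sequence.length (bSufFlags sequence) false 0 sequence

-- ===== PRECONDITION & SPEC =====
def Spec_make_unsorted (sequence : List Int) (out : List Int) : Prop := out = make_unsorted_alt sequence
instance (sequence : List Int) (out : List Int) : Decidable (Spec_make_unsorted sequence out) := by unfold Spec_make_unsorted; infer_instance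

-- ===== CLAIM (what is proved, stated in full; the proofs are below) =====
def Claim_equal_make_unsorted : Prop := ∀ (sequence : List Int), Dom_make_unsorted sequence → Spec_make_unsorted sequence (make_unsorted sequence)

-- ===== LEMMAS AND PROOFS =====

theorem aIsSorted_eq_chain (xs : List Int) :
    aIsSorted xs = decide (List.IsChain (· ≤ ·) xs) := by
  unfold aIsSorted
  have h : ((xs.length : Int) - 1) = (((xs.length - 1 : Nat)) : Int) ∨ xs = [] := by
    cases xs with
    | nil => right; rfl
    | cons a t => left; simp
  rcases h with h | h
  · rw [h, PySem.List.pyRange_zero_nat]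
    simp only [List.all_map]
    rw [Bool.eq_iff_iff]
    simp only [List.all_eq_true, List.mem_range, decide_eq_true_eq, Function.comp]
    rw [List.isChain_iff_getElem]
    constructor
    · intro H i hi
      have := H i (by omega)
      rw [show ((i:Int)+1) = (((i+1:Nat)):Int) by push_cast; ring] at this
      rwa [PySem.List.pyGetD_natCast, PySem.List.pyGetD_natCast,
        List.getD_eq_getElem _ _ (by omega), List.getD_eq_getElem _ _ (by omega)] at this
    · intro H i hi
      rw [show ((i:Int)+1) = (((i+1:Nat)):Int) by push_cast; ring]
      rw [PySem.List.pyGetD_natCast, PySem.List.pyGetD_natCast,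
        List.getD_eq_getElem _ _ (by omega), List.getD_eq_getElem _ _ (by omega)]
      exact H i (by omega)
  · subst h; decide

theorem bSufFlags_getD (xs : List Int) : ∀ (t : Nat), t < xs.length →
    (bSufFlags xs).getD t false = !decide (List.IsChain (· ≤ ·) (xs.drop t)) := by
  match xs with
  | [] => intro t ht; simp at ht
  | [a] => intro t ht
           cases t with
           | zero => simp [bSufFlags]
           | succ t' => simp at ht
  | a :: b :: rest =>
    intro t ht
    cases t with
    | zero =>
      have hh : (bSufFlags (b :: rest)).headD false = (bSufFlags (b :: rest)).getD 0 false := by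
        cases h : bSufFlags (b :: rest) <;> rfl
      have ih := bSufFlags_getD (b :: rest) 0 (by simp)
      simp only [bSufFlags, List.getD_cons_zero, hh, ih, List.drop_zero]
      by_cases hab : a ≤ b <;>
        by_cases hc : List.IsChain (fun x1 x2 : Int => x1 ≤ x2) (b :: rest) <;>
          simp [List.isChain_cons_cons, hab, hc] <;> omega
    | succ t' =>
      simp only [bSufFlags, List.getD_cons_succ, List.drop_succ_cons]
      exact bSufFlags_getD (b :: rest) t' (by simpa using ht)

-- the heart: A's is_sorted test on the modified list equals B's neighbour test
theorem test_eq (s : List Int) (i : Nat) (hi : i < s.length) (v : Int) :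
    (aIsSorted (s.take i ++ [v] ++ s.drop (i + 1)) = false) ↔
      (!decide (List.IsChain (· ≤ ·) (s.take i))
        || (decide (i + 1 < s.length) && (bSufFlags s).getD (i + 1) false)
        || (decide (0 < i) && decide (s.getD (i - 1) 0 > v))
        || (decide (i + 1 < s.length) && decide (v > s.getD (i + 1) 0))) = true := by
  rw [aIsSorted_eq_chain, List.append_assoc, List.singleton_append]
  rw [decide_eq_false_iff_not, List.isChain_append, List.isChain_cons, List.head?_drop,
    List.getLast?_take]
  by_cases h1 : i + 1 < s.length
  · rw [bSufFlags_getD s (i + 1) h1]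
    have hg : s[i+1]? = some s[i+1] := List.getElem?_eq_getElem h1
    have hd : s.getD (i + 1) 0 = s[i+1] := List.getD_eq_getElem s 0 h1
    by_cases h0 : i = 0
    · subst h0
      simp only [hg, hd]
      by_cases hS : List.IsChain (fun x1 x2 : Int => x1 ≤ x2) s.tail <;>
        simp [hS, h1, List.drop_one] <;> try omega
    · have hg' : s[i-1]? = some s[i-1] := List.getElem?_eq_getElem (by omega)
      have hd' : s.getD (i - 1) 0 = s[i-1] := List.getD_eq_getElem s 0 (by omega)
      simp only [hg, hd, hg', hd', if_neg h0, Option.some_or]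
      by_cases hP : List.IsChain (fun x1 x2 : Int => x1 ≤ x2) (s.take i) <;>
        by_cases hS : List.IsChain (fun x1 x2 : Int => x1 ≤ x2) (s.drop (i+1)) <;>
          simp [hP, hS, h1] <;> omega
  · have hg : s[i+1]? = none := List.getElem?_eq_none (by omega)
    have hdrop : s.drop (i + 1) = [] := List.drop_eq_nil_of_le (by omega)
    by_cases h0 : i = 0
    · subst h0
      simp [hdrop, h1]
    · have hg' : s[i-1]? = some s[i-1] := List.getElem?_eq_getElem (by omega)
      have hd' : s.getD (i - 1) 0 = s[i-1] := List.getD_eq_getElem s 0 (by omega)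
      simp only [hg, hdrop, hg', hd', if_neg h0, Option.some_or]
      by_cases hP : List.IsChain (fun x1 x2 : Int => x1 ≤ x2) (s.take i) <;>
        simp [hP, h1] <;> omega

theorem tryK_eq (s : List Int) (i : Nat) (hi : i < s.length) (numStr : List Char) (j : Nat)
    (ks : List Int) :
    bTryK s s.length (bSufFlags s) (!decide (List.IsChain (· ≤ ·) (s.take i))) i numStr j ks =
      aTryK s i numStr j ks := by
  induction ks with
  | nil => rfl
  | cons k ks ih =>
    have hnum : aNewNum numStr j k = bNewNum numStr j k := rfl
    simp only [bTryK, aTryK, hnum]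
    cases h : aIsSorted (s.take i ++ [bNewNum numStr j k] ++ s.drop (i + 1)) with
    | false =>
      have hc := (test_eq s i hi (bNewNum numStr j k)).mp h
      rw [if_pos hc, if_neg (by simp [h])]
    | true =>
      have hc : ¬ ((!decide (List.IsChain (· ≤ ·) (s.take i))
          || (decide (i + 1 < s.length) && (bSufFlags s).getD (i + 1) false)
          || (decide (0 < i) && decide (s.getD (i - 1) 0 > bNewNum numStr j k))
          || (decide (i + 1 < s.length) && decide (bNewNum numStr j k > s.getD (i + 1) 0))) = true) := by
        intro hcon
        have := (test_eq s i hi (bNewNum numStr j k)).mpr hcon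
        rw [h] at this
        exact Bool.true_eq_false.mp this
      rw [if_neg hc, if_pos (by simp [h]), ih]

theorem tryJ_eq (s : List Int) (i : Nat) (hi : i < s.length) (numStr : List Char)
    (js : List Nat) :
    bTryJ s s.length (bSufFlags s) (!decide (List.IsChain (· ≤ ·) (s.take i))) i numStr js =
      aTryJ s i numStr js := by
  induction js with
  | nil => rfl
  | cons j js ih =>
    simp only [bTryJ, aTryJ, tryK_eq s i hi numStr j, ih]

-- updating the running prefix flag keeps its invariant
theorem pref_step (s : List Int) (i : Nat) (hi : i < s.length) :
    (if 0 < i ∧ s.getD (i - 1) 0 > s.getD i 0 then true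
      else (!decide (List.IsChain (· ≤ ·) (s.take i)))) =
      !decide (List.IsChain (· ≤ ·) (s.take (i + 1))) := by
  have htake : s.take (i + 1) = s.take i ++ [s[i]] := by
    rw [List.take_add_one, List.getElem?_eq_getElem hi]
    rfl
  have hd : s.getD i 0 = s[i] := List.getD_eq_getElem s 0 hi
  have hiff : List.IsChain (fun x1 x2 : Int => x1 ≤ x2) (s.take (i + 1)) ↔
      (List.IsChain (fun x1 x2 : Int => x1 ≤ x2) (s.take i) ∧ (i = 0 ∨ s[i - 1] ≤ s[i])) := by
    rw [htake, List.isChain_append, List.getLast?_take]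
    by_cases h0 : i = 0
    · simp [h0]
    · have hg' : s[i-1]? = some s[i-1] := List.getElem?_eq_getElem (by omega)
      simp [h0, hg']
  by_cases h0 : i = 0
  · subst h0
    simp [hiff]
  · have h0' : 0 < i := Nat.pos_of_ne_zero h0
    have hq' : s[i-1]? = some s[i-1] := List.getElem?_eq_getElem (by omega)
    have hq : s[i]? = some s[i] := List.getElem?_eq_getElem hi
    by_cases hab : s[i-1] ≤ s[i] <;>
      by_cases hP : List.IsChain (fun x1 x2 : Int => x1 ≤ x2) (s.take i) <;>
        simp [hiff, hq, hq', hP, hab, h0, h0'] <;> try omega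

theorem loop_eq (s : List Int) (rest : List Int) : ∀ (i : Nat), rest = s.drop i →
    bLoop s s.length (bSufFlags s) (!decide (List.IsChain (· ≤ ·) (s.take i))) i rest =
      aLoop s i rest := by
  induction rest with
  | nil => intro i _; rfl
  | cons num rest' ih =>
    intro i hrest
    have hi : i < s.length := by
      have := congrArg List.length hrest
      simp [List.length_drop] at this
      omega
    have hrest' : rest' = s.drop (i + 1) := by
      have : (num :: rest').drop 1 = (s.drop i).drop 1 := by rw [hrest]
      simpa [List.drop_drop] using this
    simp only [bLoop, aLoop]
    rw [tryJ_eq s i hi]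
    cases h : aTryJ s i (PySem.Int.toChars num) (List.range (PySem.Int.toChars num).length) with
    | some r => rfl
    | none =>
      rw [pref_step s i hi]
      exact ih (i + 1) hrest'

-- ===== VERDICT (by name: the statement is the Claim_ definition above) =====
theorem make_unsorted_spec : Claim_equal_make_unsorted := by
  intro s _
  unfold Spec_make_unsorted make_unsorted make_unsorted_alt
  rw [← loop_eq s s 0 rfl]
  simp
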